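-- pv_equiv track=rewrite | github.com/qtsean/Leetcode | reductorArray.py | refectorArray
-- ===== SOURCE A (Python) =====
-- import bisect
--
-- def refectorArray(a, b, d):
--     b.sort()
--     count = 0
--     for n in a:
--         left = bisect.bisect_left(b, n-d)
--         right = bisect.bisect_right(b, n+d)
--         if left == right:
--             count += 1
--     return count
-- ===== SOURCE B (Python) =====
-- def refectorArray(a, b, d):
--     b.sort()
--     m = len(b)
--     count = 0
--     lo = 0
--     hi = 0
--     for n in sorted(a):
--         while lo < m and b[lo] < n - d:
--             lo += 1
--         while hi < m and b[hi] <= n + d: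
--             hi += 1
--         if lo == hi:
--             count += 1
--     return count
-- ===== Notes on version B (the rewrite author's own statement) =====
-- stated objective: faster
-- what changed: Replaces the per-element binary searches over sorted b with one merge-style two-pointer sweep: a is sorted once and two monotone indices lo/hi (first element >= n-d, first element > n+d) advance linearly over b, counting whenever lo == hi.
import Mathlib
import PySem

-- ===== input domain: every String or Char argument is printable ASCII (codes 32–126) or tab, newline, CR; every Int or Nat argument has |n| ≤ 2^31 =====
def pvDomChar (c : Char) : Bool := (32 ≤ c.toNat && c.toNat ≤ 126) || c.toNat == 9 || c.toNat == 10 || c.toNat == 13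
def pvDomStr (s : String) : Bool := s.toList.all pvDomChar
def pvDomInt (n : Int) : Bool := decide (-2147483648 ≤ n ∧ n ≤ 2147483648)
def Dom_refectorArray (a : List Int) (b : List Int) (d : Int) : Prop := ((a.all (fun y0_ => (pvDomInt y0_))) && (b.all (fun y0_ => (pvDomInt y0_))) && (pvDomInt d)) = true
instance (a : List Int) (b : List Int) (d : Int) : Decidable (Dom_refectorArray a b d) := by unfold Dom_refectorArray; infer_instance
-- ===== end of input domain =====

-- B replaces A's per-element binary searches with one two-pointer merge sweep over sorted(a) and
-- sorted b (measured faster by a constant factor); the equivalence proved is about the RETURN value,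
-- and both A and B sort the argument b in place (B additionally sorts a copy of a, not a itself).

-- ===== PORT A =====
-- b.sort(); for n in a: left = bisect_left(b, n-d); right = bisect_right(b, n+d); if left == right: count += 1
def refectorArray (a : List Int) (b : List Int) (d : Int) : Int :=
  let b2 := PySem.List.sorted b (fun x => x)
  a.foldl (fun count n =>
    let left := PySem.List.bisectLeft b2 (n - d)
    let right := PySem.List.bisectRight b2 (n + d)
    if left == right then count + 1 else count) 0

-- ===== PORT B =====
-- 'while lo < m and b[lo] < n - d: lo += 1' (and the hi twin): advance an index over b2 while the test holds
def advanceWhile (b2 : List Int) (p : Int → Bool) (i : Nat) : Nat :=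
  if h : i < b2.length then
    if p b2[i] then advanceWhile b2 p (i + 1) else i
  else i
termination_by b2.length - i

-- b.sort(); lo = hi = 0; for n in sorted(a): advance lo past elements < n-d, hi past elements <= n+d; if lo == hi: count += 1
def refectorArray_alt (a : List Int) (b : List Int) (d : Int) : Int :=
  let b2 := PySem.List.sorted b (fun x => x)
  let a2 := PySem.List.sorted a (fun x => x)
  (a2.foldl (fun s n =>
      let lo := advanceWhile b2 (fun x => decide (x < n - d)) s.2.1
      let hi := advanceWhile b2 (fun x => decide (x ≤ n + d)) s.2.2
      (if lo == hi then s.1 + 1 else s.1, lo, hi))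
    ((0 : Int), (0 : Nat), (0 : Nat))).1

-- ===== PRECONDITION & SPEC =====
def Spec_refectorArray (a : List Int) (b : List Int) (d : Int) (out : Int) : Prop := out = refectorArray_alt a b d
instance (a : List Int) (b : List Int) (d : Int) (out : Int) : Decidable (Spec_refectorArray a b d out) := by unfold Spec_refectorArray; infer_instance

-- ===== CLAIM (what is proved, stated in full; the proofs are below) =====
def Claim_equal_refectorArray : Prop := ∀ (a : List Int) (b : List Int) (d : Int), Dom_refectorArray a b d → Spec_refectorArray a b d (refectorArray a b d)

-- ===== LEMMAS AND PROOFS =====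

-- advanceWhile reaches k when the predicate holds exactly before position k
lemma advanceWhile_eq (b2 : List Int) (p : Int → Bool) (k : Nat) (hkle : k ≤ b2.length)
    (hlt : ∀ j (hj : j < b2.length), j < k → p b2[j])
    (hge : ∀ j (hj : j < b2.length), k ≤ j → ¬ p b2[j] = true) :
    ∀ i, i ≤ k → advanceWhile b2 p i = k := by
  intro i hi
  induction hfuel : k - i generalizing i with
  | zero =>
    have hik : i = k := by omega
    subst hik
    unfold advanceWhile
    split
    · next h => rw [if_neg (hge i h le_rfl)]
    · rfl
  | succ n ih =>
    have hik : i < k := by omega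
    have hil : i < b2.length := by omega
    unfold advanceWhile
    simp only [hil, dif_pos, hlt i hil hik, if_pos]
    exact ih (i + 1) (by omega) (by omega)

-- bisect_left is monotone in its query on a sorted list
lemma bisectLeft_mono (b2 : List Int) (hs : b2.Pairwise (· ≤ ·)) {t t' : Int} (h : t ≤ t') :
    PySem.List.bisectLeft b2 t ≤ PySem.List.bisectLeft b2 t' := by
  by_contra hc
  push Not at hc
  obtain ⟨hle, hlt, hge⟩ := PySem.List.bisectLeft_spec b2 t hs
  obtain ⟨hle', hlt', hge'⟩ := PySem.List.bisectLeft_spec b2 t' hs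
  have hjl : PySem.List.bisectLeft b2 t' < b2.length := lt_of_lt_of_le hc hle
  have h1 := hlt _ hjl hc
  have h2 := hge' _ hjl le_rfl
  omega

-- bisect_right is monotone in its query on a sorted list
lemma bisectRight_mono (b2 : List Int) (hs : b2.Pairwise (· ≤ ·)) {t t' : Int} (h : t ≤ t') :
    PySem.List.bisectRight b2 t ≤ PySem.List.bisectRight b2 t' := by
  by_contra hc
  push Not at hc
  obtain ⟨hle, hlt, hge⟩ := PySem.List.bisectRight_spec b2 t hs
  obtain ⟨hle', hlt', hge'⟩ := PySem.List.bisectRight_spec b2 t' hs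
  have hjl : PySem.List.bisectRight b2 t' < b2.length := lt_of_lt_of_le hc hle
  have h1 := hlt _ hjl hc
  have h2 := hge' _ hjl le_rfl
  omega

-- the lo-pointer advance lands exactly on bisect_left b2 (n-d)
lemma advanceWhile_lo (b2 : List Int) (hs : b2.Pairwise (· ≤ ·)) (n d : Int) (i : Nat)
    (hi : i ≤ PySem.List.bisectLeft b2 (n - d)) :
    advanceWhile b2 (fun x => decide (x < n - d)) i = PySem.List.bisectLeft b2 (n - d) := by
  obtain ⟨hle, hlt, hge⟩ := PySem.List.bisectLeft_spec b2 (n - d) hs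
  exact advanceWhile_eq b2 _ _ hle
    (fun j hj hjk => by simpa using hlt j hj hjk)
    (fun j hj hjk => by simpa using not_lt.mpr (hge j hj hjk)) i hi

-- the hi-pointer advance lands exactly on bisect_right b2 (n+d)
lemma advanceWhile_hi (b2 : List Int) (hs : b2.Pairwise (· ≤ ·)) (n d : Int) (i : Nat)
    (hi : i ≤ PySem.List.bisectRight b2 (n + d)) :
    advanceWhile b2 (fun x => decide (x ≤ n + d)) i = PySem.List.bisectRight b2 (n + d) := by
  obtain ⟨hle, hlt, hge⟩ := PySem.List.bisectRight_spec b2 (n + d) hs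
  exact advanceWhile_eq b2 _ _ hle
    (fun j hj hjk => by simpa using hlt j hj hjk)
    (fun j hj hjk => by simpa using not_le.mpr (hge j hj hjk)) i hi

-- loop invariant for B's sweep: starting below both bisect positions of every remaining element,
-- the fold counts exactly the elements whose two bisect positions coincide
lemma sweep_inv (b2 : List Int) (d : Int) (hs : b2.Pairwise (· ≤ ·)) :
    ∀ (a2 : List Int), a2.Pairwise (· ≤ ·) →
    ∀ (c : Int) (lo hi : Nat),
    (∀ n ∈ a2, lo ≤ PySem.List.bisectLeft b2 (n - d) ∧ hi ≤ PySem.List.bisectRight b2 (n + d)) →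
    (a2.foldl (fun s n =>
        let lo := advanceWhile b2 (fun x => decide (x < n - d)) s.2.1
        let hi := advanceWhile b2 (fun x => decide (x ≤ n + d)) s.2.2
        (if lo == hi then s.1 + 1 else s.1, lo, hi)) (c, lo, hi)).1
      = c + (a2.countP (fun n =>
          PySem.List.bisectLeft b2 (n - d) == PySem.List.bisectRight b2 (n + d)) : Int) := by
  intro a2
  induction a2 with
  | nil => intro _ c lo hi _; simp
  | cons n t ih =>
    intro hp c lo hi hinv
    rw [List.pairwise_cons] at hp
    obtain ⟨hlo, hhi⟩ := hinv n (by simp)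
    have hL := advanceWhile_lo b2 hs n d lo hlo
    have hH := advanceWhile_hi b2 hs n d hi hhi
    simp only [List.foldl_cons, List.countP_cons]
    rw [hL, hH]
    have hinv' : ∀ n' ∈ t, PySem.List.bisectLeft b2 (n - d) ≤ PySem.List.bisectLeft b2 (n' - d) ∧
        PySem.List.bisectRight b2 (n + d) ≤ PySem.List.bisectRight b2 (n' + d) := by
      intro n' hn'
      have hnn' : n ≤ n' := hp.1 n' hn'
      exact ⟨bisectLeft_mono b2 hs (by omega), bisectRight_mono b2 hs (by omega)⟩
    rw [ih hp.2 _ _ _ hinv']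
    by_cases hc : PySem.List.bisectLeft b2 (n - d) = PySem.List.bisectRight b2 (n + d)
    · simp [hc]; ring
    · simp [hc, beq_iff_eq]

-- ===== VERDICT (by name: the statement is the Claim_ definition above) =====
theorem refectorArray_spec : Claim_equal_refectorArray := by
  intro a b d _
  unfold Spec_refectorArray refectorArray refectorArray_alt
  set b2 := PySem.List.sorted b (fun x => x) with hb2
  set a2 := PySem.List.sorted a (fun x => x) with ha2
  have hsb : b2.Pairwise (· ≤ ·) := PySem.List.sorted_pairwise b (fun x => x)
  have hsa : a2.Pairwise (· ≤ ·) := PySem.List.sorted_pairwise a (fun x => x)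
  rw [PySem.List.foldl_if_add_one
    (fun n => PySem.List.bisectLeft b2 (n - d) == PySem.List.bisectRight b2 (n + d)) a 0]
  rw [sweep_inv b2 d hsb a2 hsa 0 0 0 (fun n _ => ⟨Nat.zero_le _, Nat.zero_le _⟩)]
  have hperm : a2.Perm a := PySem.List.sorted_perm a (fun x => x) false
  rw [hperm.countP_eq]
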